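-- pv_equiv track=rewrite | github.com/FezzikVonSilver/5080-Final-Project | src/min_span_tree.py | construct_mst
-- ===== SOURCE A (Python) =====
-- def construct_mst(prev,cost):
-- 	mst = [[0 for _ in range(len(prev))] for _ in range(len(prev))]
-- 	for i in range(len(prev)):
-- 		for j in range(len(prev)):
-- 			if prev[j] == i:
-- 				mst[i][j] = cost[j]
-- 			if prev[i] == j:
-- 				mst[i][j] = cost[i]
--
-- 	return mst
-- ===== SOURCE B (Python) =====
-- def construct_mst(prev, cost):
--     n = len(prev)
--     mst = [[0] * n for _ in range(n)]
--     # pass 1: the prev[j] == i rule, one write per node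
--     for k in range(n):
--         p = prev[k]
--         if 0 <= p < n:
--             mst[p][k] = cost[k]
--     # pass 2: the prev[i] == j rule; written last, so it overwrites pass 1
--     for k in range(n):
--         p = prev[k]
--         if 0 <= p < n:
--             mst[k][p] = cost[k]
--     return mst
-- ===== Notes on version B (the rewrite author's own statement) =====
-- stated objective: faster
-- what changed: Replaces the nested O(n^2) scan over all (i,j) cell/parent comparisons with two linear passes over the nodes that write each MST edge's two cells directly (mst[prev[k]][k] then, overwriting, mst[k][prev[k]]).
import Mathlib
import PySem

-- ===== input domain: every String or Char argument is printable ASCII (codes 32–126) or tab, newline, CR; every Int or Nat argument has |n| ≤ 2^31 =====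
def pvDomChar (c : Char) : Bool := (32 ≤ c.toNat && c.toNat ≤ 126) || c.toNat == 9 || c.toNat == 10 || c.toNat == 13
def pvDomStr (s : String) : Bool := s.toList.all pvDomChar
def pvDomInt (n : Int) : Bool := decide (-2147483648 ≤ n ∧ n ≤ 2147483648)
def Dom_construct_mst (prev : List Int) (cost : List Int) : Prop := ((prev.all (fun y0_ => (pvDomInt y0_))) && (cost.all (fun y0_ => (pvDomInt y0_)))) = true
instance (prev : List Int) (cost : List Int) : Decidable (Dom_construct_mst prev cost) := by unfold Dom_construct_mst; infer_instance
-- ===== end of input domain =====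

-- B replaces A's nested cell-by-cell scan with two single passes over the nodes that write
-- each edge's two matrix cells directly (objective: faster). Neither version mutates its
-- arguments; the equivalence is about the return value.

-- helper shared by both ports: mst[i][j] = v
def pvSetM (m : List (List Int)) (i j : Nat) (v : Int) : List (List Int) :=
  m.modify i (fun row => row.set j v)

-- ===== PORT A =====
def construct_mst (prev : List Int) (cost : List Int) : List (List Int) :=
  (PySem.List.pyRange 0 (prev.length : Int) 1).foldl (fun mst i =>
    (PySem.List.pyRange 0 (prev.length : Int) 1).foldl (fun mst j =>
      let mst1 := if PySem.List.pyGetD prev j 0 = i then pvSetM mst i.toNat j.toNat (PySem.List.pyGetD cost j 0) else mst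
      if PySem.List.pyGetD prev i 0 = j then pvSetM mst1 i.toNat j.toNat (PySem.List.pyGetD cost i 0) else mst1)
      mst)
    (List.replicate prev.length (List.replicate prev.length 0))

-- ===== PORT B =====
def construct_mst_alt (prev : List Int) (cost : List Int) : List (List Int) :=
  let n : Int := prev.length
  let m0 := List.replicate prev.length (List.replicate prev.length (0 : Int))
  let m1 := (PySem.List.pyRange 0 n 1).foldl (fun mst k =>
    let p := PySem.List.pyGetD prev k 0
    if 0 ≤ p ∧ p < n then pvSetM mst p.toNat k.toNat (PySem.List.pyGetD cost k 0) else mst) m0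
  (PySem.List.pyRange 0 n 1).foldl (fun mst k =>
    let p := PySem.List.pyGetD prev k 0
    if 0 ≤ p ∧ p < n then pvSetM mst k.toNat p.toNat (PySem.List.pyGetD cost k 0) else mst) m1

-- ===== PRECONDITION & SPEC =====
-- Pre_ excludes exactly the inputs where the Python A raises IndexError: a node k whose
-- parent prev[k] lies in range(len(prev)) forces the read cost[k], so cost must reach
-- every such k.  (B reads cost[k] under the same condition, so B raises there too.)
def Pre_construct_mst (prev : List Int) (cost : List Int) : Prop :=
  ∀ k ∈ List.range prev.length,
    0 ≤ prev.getD k 0 → prev.getD k 0 < (prev.length : Int) → k < cost.length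
instance (prev : List Int) (cost : List Int) : Decidable (Pre_construct_mst prev cost) := by
  unfold Pre_construct_mst; infer_instance

def pvWitness_construct_mst : List Int × List Int := ([1, -1, 0], [5, 0, 7])

def Spec_construct_mst (prev : List Int) (cost : List Int) (out : List (List Int)) : Prop := out = construct_mst_alt prev cost
instance (prev : List Int) (cost : List Int) (out : List (List Int)) : Decidable (Spec_construct_mst prev cost out) := by unfold Spec_construct_mst; infer_instance

-- ===== CLAIM (what is proved, stated in full; the proofs are below) =====
def Claim_equal_construct_mst : Prop := ∀ (prev : List Int) (cost : List Int), Dom_construct_mst prev cost → Pre_construct_mst prev cost → Spec_construct_mst prev cost (construct_mst prev cost)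

-- ===== LEMMAS AND PROOFS =====
-- Both programs are shown to produce the same closed-form matrix pvTarget:
-- entry (a,b) is cost[a] if prev[a] == b (A's second rule, which wins ties),
-- else cost[b] if prev[b] == a (A's first rule), else 0.

def pvEnt (prev cost : List Int) (a b : Nat) : Int :=
  if prev.getD a 0 = (b : Int) then cost.getD a 0
  else if prev.getD b 0 = (a : Int) then cost.getD b 0
  else 0

def pvTarget (prev cost : List Int) : List (List Int) :=
  (List.range prev.length).map (fun a => (List.range prev.length).map (fun b => pvEnt prev cost a b))

theorem pv_set_map_range {n t : Nat} (f : Nat → Int) (v : Int) :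
    ((List.range n).map f).set t v = (List.range n).map (fun b => if b = t then v else f b) := by
  apply List.ext_getElem
  · simp
  · intro b h1 h2
    simp only [List.length_map, List.length_range] at h2
    simp only [List.getElem_set, List.getElem_map, List.getElem_range]
    split_ifs with h3 h4 h4
    · rfl
    · exact absurd h3.symm h4
    · exact absurd h4.symm h3
    · rfl

def pvRowStepA (prev cost : List Int) (a : Nat) (row : List Int) (k : Nat) : List Int :=
  let r1 := if prev.getD k 0 = (a : Int) then row.set k (cost.getD k 0) else row
  if prev.getD a 0 = (k : Int) then r1.set k (cost.getD a 0) else r1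

theorem pv_innerA (prev cost : List Int) (a : Nat) (L : List Nat) (m : List (List Int)) :
    L.foldl (fun mst k =>
      let m1 := if prev.getD k 0 = (a : Int) then pvSetM mst a k (cost.getD k 0) else mst
      if prev.getD a 0 = (k : Int) then pvSetM m1 a k (cost.getD a 0) else m1) m
    = m.modify a (fun row => L.foldl (pvRowStepA prev cost a) row) := by
  induction L generalizing m with
  | nil => exact (List.modify_id a m).symm
  | cons k L ih =>
    simp only [List.foldl_cons, ih]
    have hstep : (let m1 := if prev.getD k 0 = (a : Int) then pvSetM m a k (cost.getD k 0) else m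
        if prev.getD a 0 = (k : Int) then pvSetM m1 a k (cost.getD a 0) else m1)
        = m.modify a (fun row => pvRowStepA prev cost a row k) := by
      simp only [pvSetM, pvRowStepA]
      split_ifs with h1 h2 <;>
        simp_all only [List.modify_modify_eq, Function.comp_def] <;>
        first
          | rfl
          | exact (List.modify_id a m).symm
    rw [hstep, List.modify_modify_eq]
    rfl

theorem pv_rowA (prev cost : List Int) (a : Nat) (t : Nat) (ht : t ≤ prev.length) :
    (List.range t).foldl (pvRowStepA prev cost a) (List.replicate prev.length 0)
    = (List.range prev.length).map (fun b => if b < t then pvEnt prev cost a b else 0) := by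
  induction t with
  | zero =>
    apply List.ext_getElem <;> simp
  | succ t ih =>
    have hn : t < prev.length := by omega
    rw [List.range_succ, List.foldl_append, ih (by omega), List.foldl_cons, List.foldl_nil]
    simp only [pvRowStepA]
    split_ifs with c1 c2 c2 <;>
      (try simp only [List.set_set]) <;> (try simp only [pv_set_map_range]) <;>
      (apply List.map_congr_left; intro b hb; simp only [List.mem_range] at hb) <;>
      rcases eq_or_ne b t with hbt | hbt <;>
      first
        | (subst hbt
           simp only [List.getD_eq_getElem?_getD] at c1 c2
           simp [pvEnt, c1, c2])
        | ((try rw [if_neg hbt])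
           simp only [show (b < t) ↔ (b < t + 1) from by omega])

theorem pv_outerA (prev cost : List Int) (t : Nat) (ht : t ≤ prev.length) :
    (List.range t).foldl (fun mst a => mst.modify a (fun row => (List.range prev.length).foldl (pvRowStepA prev cost a) row))
      (List.replicate prev.length (List.replicate prev.length 0))
    = (List.range prev.length).map (fun a => if a < t then (List.range prev.length).map (fun b => pvEnt prev cost a b) else List.replicate prev.length 0) := by
  induction t with
  | zero => apply List.ext_getElem <;> simp
  | succ t ih =>
    rw [List.range_succ, List.foldl_append, ih (by omega), List.foldl_cons, List.foldl_nil]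
    apply List.ext_getElem
    · simp
    · intro a ha1 ha2
      simp only [List.length_map, List.length_range] at ha2
      rw [List.getElem_modify]
      simp only [List.getElem_map, List.getElem_range]
      rcases eq_or_ne t a with h1 | h1
      · subst h1
        rw [if_pos rfl, if_neg (lt_irrefl t), if_pos (by omega)]
        rw [pv_rowA prev cost t prev.length (le_refl _)]
        apply List.map_congr_left
        intro b hb
        simp only [List.mem_range] at hb
        rw [if_pos hb]
      · rw [if_neg h1]
        simp only [show (a < t) ↔ (a < t + 1) from by omega]

theorem pv_A_eq_target (prev cost : List Int) : construct_mst prev cost = pvTarget prev cost := by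
  unfold construct_mst
  simp only [PySem.List.pyRange_zero_nat, List.foldl_map, PySem.List.pyGetD_natCast, Int.toNat_natCast]
  refine (PySem.List.foldl_congr_mem (g := fun (mst : List (List Int)) (a : Nat) => mst.modify a (fun row => (List.range prev.length).foldl (pvRowStepA prev cost a) row)) _ _ _ ?_).trans ?_
  · intro acc a _
    exact pv_innerA prev cost a (List.range prev.length) acc
  · rw [pv_outerA prev cost prev.length (le_refl _)]
    unfold pvTarget
    apply List.map_congr_left
    intro a ha
    simp only [List.mem_range] at ha
    rw [if_pos ha]

theorem pv_setM_map_map {n : Nat} (i j : Nat) (v : Int) (f : Nat → Nat → Int) :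
    pvSetM ((List.range n).map (fun a => (List.range n).map (f a))) i j v
    = (List.range n).map (fun a => (List.range n).map (fun b => if a = i ∧ b = j then v else f a b)) := by
  unfold pvSetM
  apply List.ext_getElem
  · simp
  · intro a ha1 ha2
    simp only [List.length_map, List.length_range] at ha2
    rw [List.getElem_modify]
    simp only [List.getElem_map, List.getElem_range]
    rcases eq_or_ne i a with h | h
    · subst h
      rw [if_pos rfl, pv_set_map_range]
      apply List.map_congr_left
      intro b hb
      rcases eq_or_ne b j with h2 | h2
      · subst h2; simp
      · simp [h2]
    · rw [if_neg h]
      apply List.map_congr_left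
      intro b hb
      rw [if_neg (by tauto)]

theorem pv_pass1 (prev cost : List Int) (t : Nat) (ht : t ≤ prev.length) :
    (List.range t).foldl (fun mst k =>
        if 0 ≤ prev.getD k 0 ∧ prev.getD k 0 < (prev.length : Int) then
          pvSetM mst (prev.getD k 0).toNat k (cost.getD k 0) else mst)
      (List.replicate prev.length (List.replicate prev.length 0))
    = (List.range prev.length).map (fun (a : Nat) => (List.range prev.length).map (fun (b : Nat) =>
        if b < t ∧ prev.getD b 0 = (a : Int) then cost.getD b 0 else 0)) := by
  induction t with
  | zero => apply List.ext_getElem <;> simp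
  | succ t ih =>
    have hn : t < prev.length := by omega
    rw [List.range_succ, List.foldl_append, ih (by omega), List.foldl_cons, List.foldl_nil]
    by_cases hg : 0 ≤ prev.getD t 0 ∧ prev.getD t 0 < (prev.length : Int)
    · rw [if_pos hg, pv_setM_map_map _ _]
      apply List.map_congr_left
      intro a ha
      simp only [List.mem_range] at ha
      apply List.map_congr_left
      intro b hb
      simp only [List.mem_range] at hb
      rcases eq_or_ne b t with hbt | hbt <;> (try subst hbt) <;> split_ifs <;> first | rfl | omega
    · rw [if_neg hg]
      apply List.map_congr_left
      intro a ha
      simp only [List.mem_range] at ha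
      apply List.map_congr_left
      intro b hb
      simp only [List.mem_range] at hb
      rcases eq_or_ne b t with hbt | hbt <;> (try subst hbt) <;> split_ifs <;> first | rfl | omega

theorem pv_pass2 (prev cost : List Int) (t : Nat) (ht : t ≤ prev.length) :
    (List.range t).foldl (fun mst k =>
        if 0 ≤ prev.getD k 0 ∧ prev.getD k 0 < (prev.length : Int) then
          pvSetM mst k (prev.getD k 0).toNat (cost.getD k 0) else mst)
      ((List.range prev.length).map (fun (a : Nat) => (List.range prev.length).map (fun (b : Nat) =>
        if prev.getD b 0 = (a : Int) then cost.getD b 0 else 0)))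
    = (List.range prev.length).map (fun (a : Nat) => (List.range prev.length).map (fun (b : Nat) =>
        if a < t ∧ prev.getD a 0 = (b : Int) then cost.getD a 0
        else if prev.getD b 0 = (a : Int) then cost.getD b 0 else 0)) := by
  induction t with
  | zero =>
    simp only [List.range_zero, List.foldl_nil]
    apply List.map_congr_left
    intro a ha
    apply List.map_congr_left
    intro b hb
    simp
  | succ t ih =>
    have hn : t < prev.length := by omega
    rw [List.range_succ, List.foldl_append, ih (by omega), List.foldl_cons, List.foldl_nil]
    by_cases hg : 0 ≤ prev.getD t 0 ∧ prev.getD t 0 < (prev.length : Int)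
    · rw [if_pos hg, pv_setM_map_map _ _]
      apply List.map_congr_left
      intro a ha
      simp only [List.mem_range] at ha
      apply List.map_congr_left
      intro b hb
      simp only [List.mem_range] at hb
      rcases eq_or_ne a t with hat | hat <;> (try subst hat) <;> split_ifs <;> first | rfl | omega
    · rw [if_neg hg]
      apply List.map_congr_left
      intro a ha
      simp only [List.mem_range] at ha
      apply List.map_congr_left
      intro b hb
      simp only [List.mem_range] at hb
      rcases eq_or_ne a t with hat | hat <;> (try subst hat) <;> split_ifs <;> first | rfl | omega

theorem pv_B_eq_target (prev cost : List Int) : construct_mst_alt prev cost = pvTarget prev cost := by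
  unfold construct_mst_alt
  simp only [PySem.List.pyRange_zero_nat, List.foldl_map, PySem.List.pyGetD_natCast, Int.toNat_natCast]
  rw [pv_pass1 prev cost prev.length (le_refl _)]
  have h1 : (List.range prev.length).map (fun (a : Nat) => (List.range prev.length).map (fun (b : Nat) =>
      if b < prev.length ∧ prev.getD b 0 = (a : Int) then cost.getD b 0 else 0))
      = (List.range prev.length).map (fun (a : Nat) => (List.range prev.length).map (fun (b : Nat) =>
      if prev.getD b 0 = (a : Int) then cost.getD b 0 else 0)) := by
    apply List.map_congr_left
    intro a ha
    apply List.map_congr_left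
    intro b hb
    simp only [List.mem_range] at hb
    simp only [hb, true_and]
  rw [h1, pv_pass2 prev cost prev.length (le_refl _)]
  unfold pvTarget
  apply List.map_congr_left
  intro a ha
  simp only [List.mem_range] at ha
  apply List.map_congr_left
  intro b hb
  simp only [pvEnt, ha, true_and]

-- ===== VERDICT (by name: the statement is the Claim_ definition above) =====
theorem construct_mst_spec : Claim_equal_construct_mst := by
  intro prev cost _ _
  unfold Spec_construct_mst
  rw [pv_A_eq_target, pv_B_eq_target]
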